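-- pv_equiv track=rewrite | github.com/assembly-101/assembly101-temporal-action-segmentation | utils.py | get_labels_start_end_time
-- ===== SOURCE A (Python) =====
-- def get_labels_start_end_time(frame_wise_labels, bg_class):
--     labels = []
--     starts = []
--     ends = []
--     last_label = frame_wise_labels[0]
--     if frame_wise_labels[0] not in bg_class:
--         labels.append(frame_wise_labels[0])
--         starts.append(0)
--     for i in range(len(frame_wise_labels)):
--         if frame_wise_labels[i] != last_label:
--             if frame_wise_labels[i] not in bg_class:
--                 labels.append(frame_wise_labels[i])
--                 starts.append(i)
--             if last_label not in bg_class: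
--                 ends.append(i)
--             last_label = frame_wise_labels[i]
--     if last_label not in bg_class:
--         ends.append(i + 1)
--     return labels, starts, ends
-- ===== SOURCE B (Python) =====
-- def get_labels_start_end_time(frame_wise_labels, bg_class):
--     n = len(frame_wise_labels)
--     bounds = [0]
--     bounds += [i for i, (x, y) in enumerate(zip(frame_wise_labels[1:], frame_wise_labels), 1) if x != y]
--     bounds.append(n)
--     labels, starts, ends = [], [], []
--     for s, e in zip(bounds, bounds[1:]):
--         label = frame_wise_labels[s]
--         if label not in bg_class:
--             labels.append(label)
--             starts.append(s)
--             ends.append(e)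
--     return labels, starts, ends
-- ===== Notes on version B (the rewrite author's own statement) =====
-- stated objective: alternative
-- what changed: Replaces A's single stateful scan (last_label tracking with interleaved start/end appends) by first building an explicit segment-boundary index list and then emitting one (label,start,end) triple per boundary pair; the bg_class membership test runs once per segment instead of per frame.
import Mathlib
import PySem

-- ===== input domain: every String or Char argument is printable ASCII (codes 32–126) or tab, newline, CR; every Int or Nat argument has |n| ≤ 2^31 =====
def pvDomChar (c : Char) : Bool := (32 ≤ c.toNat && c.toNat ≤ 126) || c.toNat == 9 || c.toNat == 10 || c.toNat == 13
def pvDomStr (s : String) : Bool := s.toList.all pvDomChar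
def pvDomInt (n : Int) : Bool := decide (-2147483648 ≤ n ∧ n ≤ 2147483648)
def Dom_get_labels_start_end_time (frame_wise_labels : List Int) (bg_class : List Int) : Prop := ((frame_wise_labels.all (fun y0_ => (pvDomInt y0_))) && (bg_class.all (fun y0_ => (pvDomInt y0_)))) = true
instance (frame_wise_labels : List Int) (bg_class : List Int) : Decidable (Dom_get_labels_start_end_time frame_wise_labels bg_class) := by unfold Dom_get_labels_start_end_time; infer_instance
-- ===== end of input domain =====

-- B replaces A's stateful last_label scan by an explicit boundary-index list followed by one
-- pass over consecutive boundary pairs (objective: alternative decomposition, same cost).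

-- ===== PORT A =====
-- loop body of A's for-loop: state = (labels, starts, ends, last_label), visited (value, index)
def aStep (bg_class : List Int) (st : List Int × List Int × List Int × Int) (p : Int × Nat) :
    List Int × List Int × List Int × Int :=
  if p.1 ≠ st.2.2.2 then
    ((if p.1 ∈ bg_class then st.1 else st.1 ++ [p.1]),
     (if p.1 ∈ bg_class then st.2.1 else st.2.1 ++ [(p.2 : Int)]),
     (if st.2.2.2 ∈ bg_class then st.2.2.1 else st.2.2.1 ++ [(p.2 : Int)]),
     p.1)
  else st

def get_labels_start_end_time (frame_wise_labels : List Int) (bg_class : List Int) :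
    List Int × List Int × List Int :=
  match frame_wise_labels with
  | [] => ([], [], [])   -- Python raises IndexError on frame_wise_labels[0]; excluded by Pre_
  | h :: _ =>
    -- last_label = fw[0]; the initial appends before the loop
    let init : List Int × List Int × List Int × Int :=
      ((if h ∈ bg_class then [] else [h]), (if h ∈ bg_class then [] else [(0 : Int)]), [], h)
    -- for i in range(len(fw)): visits (fw[i], i)
    let st := frame_wise_labels.zipIdx.foldl (aStep bg_class) init
    (st.1, st.2.1,
     if st.2.2.2 ∈ bg_class then st.2.2.1
     else st.2.2.1 ++ [(frame_wise_labels.length : Int)])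

-- ===== PORT B =====
-- loop body of B's for-loop over boundary pairs (s, e)
def bStep (frame_wise_labels bg_class : List Int) (acc : List Int × List Int × List Int)
    (p : Int × Int) : List Int × List Int × List Int :=
  let label := (PySem.List.pyGet? frame_wise_labels p.1).getD 0
  if label ∈ bg_class then acc
  else (acc.1 ++ [label], acc.2.1 ++ [p.1], acc.2.2 ++ [p.2])

def get_labels_start_end_time_alt (frame_wise_labels : List Int) (bg_class : List Int) :
    List Int × List Int × List Int :=
  let n : Int := frame_wise_labels.length
  -- bounds = [0] + [i for i,(x,y) in enumerate(zip(fw[1:], fw), 1) if x != y] + [n]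
  let bounds : List Int :=
    [0] ++ (((frame_wise_labels.drop 1).zip frame_wise_labels).zipIdx 1).filterMap
             (fun p => if p.1.1 ≠ p.1.2 then some ((p.2 : Int)) else none)
        ++ [n]
  -- for s, e in zip(bounds, bounds[1:])
  (bounds.zip (bounds.drop 1)).foldl (bStep frame_wise_labels bg_class) ([], [], [])

-- ===== PRECONDITION & SPEC =====
-- Pre_ excludes exactly the empty list, on which Python A raises IndexError.
def Pre_get_labels_start_end_time (frame_wise_labels : List Int) (bg_class : List Int) : Prop :=
  frame_wise_labels ≠ []
instance (frame_wise_labels : List Int) (bg_class : List Int) :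
    Decidable (Pre_get_labels_start_end_time frame_wise_labels bg_class) := by
  unfold Pre_get_labels_start_end_time; infer_instance

def pvWitness_get_labels_start_end_time : List Int × List Int := ([0, 0, 1, 1, 0], [0])

def Spec_get_labels_start_end_time (frame_wise_labels : List Int) (bg_class : List Int)
    (out : List Int × List Int × List Int) : Prop :=
  out = get_labels_start_end_time_alt frame_wise_labels bg_class
instance (frame_wise_labels : List Int) (bg_class : List Int)
    (out : List Int × List Int × List Int) :
    Decidable (Spec_get_labels_start_end_time frame_wise_labels bg_class out) := by
  unfold Spec_get_labels_start_end_time; infer_instance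

-- ===== CLAIM (what is proved, stated in full; the proofs are below) =====
def Claim_equal_get_labels_start_end_time : Prop :=
  ∀ (frame_wise_labels : List Int) (bg_class : List Int),
    Dom_get_labels_start_end_time frame_wise_labels bg_class →
    Pre_get_labels_start_end_time frame_wise_labels bg_class →
    Spec_get_labels_start_end_time frame_wise_labels bg_class
      (get_labels_start_end_time frame_wise_labels bg_class)

-- ===== LEMMAS AND PROOFS =====

-- the segment list of last :: t, where the open segment started at index s and the next
-- index to scan is i: entries are (label, start, end)
def segsGo (last : Int) (s i : Nat) : List Int → List (Int × Nat × Nat)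
  | [] => [(last, s, i)]
  | x :: xs => if x = last then segsGo last s (i + 1) xs
               else (last, s, i) :: segsGo x i (i + 1) xs

def specOut (bg_class : List Int) (h : Int) (t : List Int) :
    List Int × List Int × List Int :=
  let F := (segsGo h 0 1 t).filter (fun g => decide (g.1 ∉ bg_class))
  (F.map (·.1), F.map (fun g => ((g.2.1 : Nat) : Int)), F.map (fun g => ((g.2.2 : Nat) : Int)))

lemma segsGo_head (last : Int) (s i : Nat) (t : List Int) :
    ∃ e rest, segsGo last s i t = (last, s, e) :: rest := by
  induction t generalizing last s i with
  | nil => exact ⟨i, [], rfl⟩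
  | cons x xs ih =>
    by_cases hx : x = last
    · obtain ⟨e, r, hr⟩ := ih last s (i + 1)
      exact ⟨e, r, by simp [segsGo, hx, hr]⟩
    · exact ⟨i, segsGo x i (i + 1) xs, by simp [segsGo, hx]⟩

lemma segsGo_ne_nil (last : Int) (s i : Nat) (t : List Int) : segsGo last s i t ≠ [] := by
  obtain ⟨e, r, hr⟩ := segsGo_head last s i t
  simp [hr]

lemma dropLast_append_getLastD {α : Type} (l : List α) (d : α) (h : l ≠ []) :
    l.dropLast ++ [l.getLastD d] = l := by
  induction l with
  | nil => exact absurd rfl h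
  | cons a l ih =>
    cases l with
    | nil => rfl
    | cons b l' => simpa using ih (by simp)

lemma segs_starts (t : List Int) (last : Int) (s j : Nat) :
    (segsGo last s (j + 1) t).map (fun g => ((g.2.1 : Nat) : Int))
      = ((s : Nat) : Int) :: ((t.zip (last :: t)).zipIdx (j + 1)).filterMap
          (fun p => if p.1.1 ≠ p.1.2 then some ((p.2 : Int)) else none) := by
  induction t generalizing last s j with
  | nil => simp [segsGo]
  | cons x xs ih =>
    by_cases hx : x = last
    · subst hx
      simpa [segsGo, List.zipIdx_cons] using ih x s (j + 1)
    · have h2 := ih x (j + 1) (j + 1)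
      rw [show segsGo last s (j + 1) (x :: xs)
            = (last, s, j + 1) :: segsGo x (j + 1) (j + 1 + 1) xs from by simp [segsGo, hx]]
      simp only [List.map_cons, List.zip_cons_cons, List.zipIdx_cons, List.filterMap_cons]
      rw [h2]
      simp [hx]

lemma segs_ends (t : List Int) (last : Int) (s i : Nat) :
    (segsGo last s i t).map (fun g => ((g.2.2 : Nat) : Int))
      = ((segsGo last s i t).map (fun g => ((g.2.1 : Nat) : Int))).tail
          ++ [((i + t.length : Nat) : Int)] := by
  induction t generalizing last s i with
  | nil => simp [segsGo]
  | cons x xs ih =>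
    by_cases hx : x = last
    · subst hx
      have h2 := ih x s (i + 1)
      rw [show segsGo x s i (x :: xs) = segsGo x s (i + 1) xs from by simp [segsGo], h2]
      have hnat : i + 1 + xs.length = i + (x :: xs).length := by simp; omega
      rw [hnat]
    · obtain ⟨e, r, hr⟩ := segsGo_head x i (i + 1) xs
      have h2 := ih x i (i + 1)
      rw [hr] at h2
      simp only [List.map_cons, List.tail_cons] at h2
      rw [show segsGo last s i (x :: xs)
            = (last, s, i) :: segsGo x i (i + 1) xs from by simp [segsGo, hx], hr]
      simp only [List.map_cons, List.tail_cons]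
      rw [h2]
      have hnat : i + 1 + xs.length = i + (x :: xs).length := by simp; omega
      rw [hnat]
      simp

lemma segs_last_end (t : List Int) (last : Int) (s i : Nat) (d : Int × Nat × Nat) :
    ((segsGo last s i t).getLastD d).2.2 = i + t.length := by
  induction t generalizing last s i d with
  | nil => simp [segsGo]
  | cons x xs ih =>
    by_cases hx : x = last
    · subst hx
      rw [show segsGo x s i (x :: xs) = segsGo x s (i + 1) xs from by simp [segsGo],
        ih x s (i + 1) d]
      simp; omega
    · rw [show segsGo last s i (x :: xs)
            = (last, s, i) :: segsGo x i (i + 1) xs from by simp [segsGo, hx],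
        List.getLastD_cons, ih x i (i + 1) (last, s, i)]
      simp; omega

lemma segs_label (fw : List Int) (t : List Int) (last : Int) (s i : Nat)
    (hs : fw[s]? = some last) (ht : t = List.drop i fw) :
    ∀ g ∈ segsGo last s i t, fw[g.2.1]? = some g.1 := by
  induction t generalizing last s i with
  | nil => intro g hg; simp [segsGo] at hg; subst hg; exact hs
  | cons x xs ih =>
    have hx0 : fw[i]? = some x := by
      have h0 : (List.drop i fw)[0]? = fw[i + 0]? := List.getElem?_drop
      rw [← ht] at h0
      simpa using h0.symm
    have hxs : xs = List.drop (i + 1) fw := by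
      have : (x :: xs).tail = (List.drop i fw).tail := by rw [ht]
      simpa [List.tail_drop] using this
    by_cases hxl : x = last
    · subst hxl
      intro g hg
      exact ih x s (i + 1) hs hxs g (by simpa [segsGo] using hg)
    · intro g hg
      simp only [segsGo, if_neg hxl, List.mem_cons] at hg
      rcases hg with rfl | hg
      · exact hs
      · exact ih x i (i + 1) hx0 hxs g hg

lemma zip_append_singleton {a b : Type} (xs : List a) (ys : List b) (z : a)
    (h : ys.length <= xs.length) : (xs ++ [z]).zip ys = xs.zip ys := by
  induction xs generalizing ys with
  | nil =>
    cases ys with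
    | nil => simp
    | cons y ys => simp at h
  | cons x xs ih =>
    cases ys with
    | nil => simp
    | cons y ys => simp [ih ys (by simpa using h)]

lemma bLoop (fw bg : List Int) (gs : List (Int × Nat × Nat)) (L S E : List Int)
    (hlab : ∀ g ∈ gs, (PySem.List.pyGet? fw ((g.2.1 : Nat) : Int)).getD 0 = g.1) :
    (gs.map (fun g => (((g.2.1 : Nat) : Int), ((g.2.2 : Nat) : Int)))).foldl
        (bStep fw bg) (L, S, E)
      = (L ++ ((gs.filter (fun g => decide (g.1 ∉ bg))).map (·.1)),
         S ++ ((gs.filter (fun g => decide (g.1 ∉ bg))).map (fun g => ((g.2.1 : Nat) : Int))),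
         E ++ ((gs.filter (fun g => decide (g.1 ∉ bg))).map (fun g => ((g.2.2 : Nat) : Int)))) := by
  induction gs generalizing L S E with
  | nil => simp
  | cons g gs ih =>
    have hg := hlab g (by simp)
    have ih' := fun L S E => ih L S E (fun g hg' => hlab g (List.mem_cons_of_mem _ hg'))
    by_cases hb : g.1 ∈ bg
    · simp only [List.map_cons, List.foldl_cons, bStep, hg, if_pos hb,
        List.filter_cons, decide_eq_true_eq]
      rw [ih']
      simp [hb]
    · simp only [List.map_cons, List.foldl_cons, bStep, hg, if_neg hb,
        List.filter_cons, decide_eq_true_eq]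
      rw [ih']
      simp [hb]

lemma aLoop (bg : List Int) (t : List Int) (last : Int) (s i : Nat) (L S E : List Int) :
    (t.zipIdx i).foldl (aStep bg) (L, S, E, last)
      = (L ++ (((segsGo last s i t).tail.filter (fun g => decide (g.1 ∉ bg))).map (·.1)),
         S ++ (((segsGo last s i t).tail.filter (fun g => decide (g.1 ∉ bg))).map
                 (fun g => ((g.2.1 : Nat) : Int))),
         E ++ (((segsGo last s i t).dropLast.filter (fun g => decide (g.1 ∉ bg))).map
                 (fun g => ((g.2.2 : Nat) : Int))),
         ((segsGo last s i t).getLastD (0, 0, 0)).1) := by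
  induction t generalizing last s i L S E with
  | nil => simp [segsGo]
  | cons x xs ih =>
    by_cases hx : x = last
    · subst hx
      have step : aStep bg (L, S, E, x) (x, i) = (L, S, E, x) := by simp [aStep]
      rw [show segsGo x s i (x :: xs) = segsGo x s (i + 1) xs from by simp [segsGo]]
      simp only [List.zipIdx_cons, List.foldl_cons, step]
      exact ih x s (i + 1) L S E
    · obtain ⟨e, r, hr⟩ := segsGo_head x i (i + 1) xs
      have step : aStep bg (L, S, E, last) (x, i)
          = ((if x ∈ bg then L else L ++ [x]),
             (if x ∈ bg then S else S ++ [(i : Int)]),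
             (if last ∈ bg then E else E ++ [(i : Int)]), x) := by
        simp [aStep, hx]
      rw [show segsGo last s i (x :: xs)
            = (last, s, i) :: segsGo x i (i + 1) xs from by simp [segsGo, hx]]
      simp only [List.zipIdx_cons, List.foldl_cons, step]
      rw [ih x i (i + 1) _ _ _]
      rw [hr]
      simp only [List.tail_cons, List.dropLast_cons₂, List.filter_cons, List.getLastD_cons,
        decide_eq_true_eq, decide_not]
      by_cases hxb : x ∈ bg <;> by_cases hlb : last ∈ bg <;>
        simp [hxb, hlb, List.append_assoc]

lemma portA_eq (h : Int) (t bg : List Int) :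
    get_labels_start_end_time (h :: t) bg = specOut bg h t := by
  obtain ⟨e0, r0, hr0⟩ := segsGo_head h 0 1 t
  have hnn := segsGo_ne_nil h 0 1 t
  have hlast := segs_last_end t h 0 1 (0, 0, 0)
  have step0 : aStep bg ((if h ∈ bg then [] else [h]),
      (if h ∈ bg then [] else [(0 : Int)]), ([] : List Int), h) (h, 0)
      = ((if h ∈ bg then [] else [h]), (if h ∈ bg then [] else [(0 : Int)]),
         ([] : List Int), h) := by simp [aStep]
  simp only [get_labels_start_end_time, List.zipIdx_cons, List.foldl_cons, step0]
  rw [aLoop bg t h 0 1]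
  -- assemble the three components
  have hsplit : segsGo h 0 1 t
      = (segsGo h 0 1 t).dropLast ++ [(segsGo h 0 1 t).getLastD (0, 0, 0)] :=
    (dropLast_append_getLastD _ _ hnn).symm
  unfold specOut
  refine Prod.ext ?_ (Prod.ext ?_ ?_)
  · rw [hr0]
    simp only [List.tail_cons, List.filter_cons, decide_not, decide_eq_true_eq]
    by_cases hb : h ∈ bg <;> simp [hb]
  · rw [hr0]
    simp only [List.tail_cons, List.filter_cons, decide_not, decide_eq_true_eq]
    by_cases hb : h ∈ bg <;> simp [hb]
  · simp only []
    set gl := (segsGo h 0 1 t).getLastD (0, 0, 0) with hgl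
    conv_rhs => rw [hsplit]
    rw [List.filter_append, List.map_append]
    by_cases hb : gl.1 ∈ bg
    · rw [if_pos hb]
      have hfl : List.filter (fun g => decide (g.1 ∉ bg)) [gl] = [] := by simp [hb]
      rw [hfl, List.map_nil, List.append_nil, List.nil_append]
    · rw [if_neg hb]
      have hfl : List.filter (fun g => decide (g.1 ∉ bg)) [gl] = [gl] := by simp [hb]
      rw [hfl, List.nil_append, List.map_cons, List.map_nil]
      congr 2
      rw [hlast]
      simp only [List.length_cons]
      push_cast
      omega

lemma portB_eq (h : Int) (t bg : List Int) :
    get_labels_start_end_time_alt (h :: t) bg = specOut bg h t := by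
  have hst := segs_starts t h 0 0
  have hed := segs_ends t h 0 1
  have hlab : ∀ g ∈ segsGo h 0 1 t, (h :: t : List Int)[g.2.1]? = some g.1 :=
    segs_label (h :: t) t h 0 1 (by simp) (by simp)
  have hlab' : ∀ g ∈ segsGo h 0 1 t,
      (PySem.List.pyGet? (h :: t) ((g.2.1 : Nat) : Int)).getD 0 = g.1 := by
    intro g hg
    rw [PySem.List.pyGet?_natCast, hlab g hg]
    rfl
  have hn : ((h :: t : List Int).length : Int) = ((1 + t.length : Nat) : Int) := by
    simp; omega
  have hbounds : ([(0 : Int)] ++ ((((h :: t : List Int).drop 1).zip (h :: t)).zipIdx 1).filterMap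
        (fun p => if p.1.1 ≠ p.1.2 then some ((p.2 : Int)) else none)
      ++ [((h :: t : List Int).length : Int)])
      = ((segsGo h 0 1 t).map (fun g => ((g.2.1 : Nat) : Int)))
        ++ [((1 + t.length : Nat) : Int)] := by
    rw [hn]
    congr 1
    rw [List.drop_one, List.tail_cons]
    rw [show (1 : Nat) = 0 + 1 from rfl] at hst ⊢
    rw [hst]
    simp
  have hdrop : (((segsGo h 0 1 t).map (fun g => ((g.2.1 : Nat) : Int)))
        ++ [((1 + t.length : Nat) : Int)]).drop 1
      = (segsGo h 0 1 t).map (fun g => ((g.2.2 : Nat) : Int)) := by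
    obtain ⟨e0, r0, hr0⟩ := segsGo_head h 0 1 t
    rw [hed]
    rw [hr0]
    simp
  simp only [get_labels_start_end_time_alt]
  rw [hbounds, hdrop]
  rw [zip_append_singleton _ _ _ (by simp)]
  rw [List.zip_map']
  rw [bLoop (h :: t) bg _ _ _ _ hlab']
  simp [specOut]


-- ===== VERDICT (by name: the statement is the Claim_ definition above) =====
theorem get_labels_start_end_time_spec : Claim_equal_get_labels_start_end_time := by
  intro fw bg _dom hpre
  unfold Spec_get_labels_start_end_time
  cases fw with
  | nil => exact absurd rfl hpre
  | cons h t => rw [portA_eq, portB_eq]
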